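-- pv_equiv track=rewrite | github.com/ji24077/SimpleResume | api/features/resume_pipeline/pipeline/lint.py | _has_unmatched_braces
-- ===== SOURCE A (Python) =====
-- def _has_unmatched_braces(tex: str) -> bool:
--     """Rough balance of `{` / `}` skipping `\\` escapes (not full TeX parser)."""
--     depth = 0
--     i = 0
--     n = len(tex)
--     while i < n:
--         c = tex[i]
--         if c == "\\" and i + 1 < n:
--             i += 2
--             continue
--         if c == "{":
--             depth += 1
--         elif c == "}":
--             depth -= 1
--             if depth < 0:
--                 return True
--         i += 1
--     return depth != 0
-- ===== SOURCE B (Python) =====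
-- def _has_unmatched_braces(tex: str) -> bool:
--     """Two-phase check: first strip every backslash-escape pair, then count braces."""
--     cleaned = []
--     i = 0
--     n = len(tex)
--     while i < n:
--         if tex[i] == "\\" and i + 1 < n:
--             i += 2
--         else:
--             cleaned.append(tex[i])
--             i += 1
--     depth = 0
--     for ch in cleaned:
--         if ch == "{":
--             depth += 1
--         elif ch == "}":
--             depth -= 1
--             if depth < 0:
--                 return True
--     return depth != 0
-- ===== Notes on version B (the rewrite author's own statement) =====
-- stated objective: alternative
-- what changed: Splits A's single interleaved escape-skipping/brace-counting loop into two phases: a strip pass that removes every backslash-escape pair, then a plain counting pass over the cleaned text with the early depth<0 return.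
import Mathlib
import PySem

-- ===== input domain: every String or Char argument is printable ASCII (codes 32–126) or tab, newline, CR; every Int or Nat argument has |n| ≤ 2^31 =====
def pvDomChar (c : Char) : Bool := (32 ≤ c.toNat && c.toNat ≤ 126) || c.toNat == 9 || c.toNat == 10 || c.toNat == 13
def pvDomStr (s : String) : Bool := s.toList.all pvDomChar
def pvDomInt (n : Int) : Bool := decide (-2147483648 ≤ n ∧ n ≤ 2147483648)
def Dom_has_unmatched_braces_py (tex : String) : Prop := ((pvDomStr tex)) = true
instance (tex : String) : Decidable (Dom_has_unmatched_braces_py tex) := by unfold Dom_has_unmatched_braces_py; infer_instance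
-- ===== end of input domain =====

-- ===== PORT A =====
-- B differs from A only in decomposition; same return value (no side effects).
def aLoop : List Char → Int → Bool
  | [], d => decide (d ≠ 0)
  | c :: [], d =>
      -- last char: the 'i + 1 < n' escape guard is false
      if c == '{' then aLoop [] (d + 1)
      else if c == '}' then (if d - 1 < 0 then true else aLoop [] (d - 1))
      else aLoop [] d
  | c :: c2 :: rest, d =>
      if c == '\\' then aLoop rest d
      else if c == '{' then aLoop (c2 :: rest) (d + 1)
      else if c == '}' then (if d - 1 < 0 then true else aLoop (c2 :: rest) (d - 1))
      else aLoop (c2 :: rest) d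

def has_unmatched_braces_py (tex : String) : Bool := aLoop tex.toList 0

-- ===== PORT B =====
-- phase 1 of Source B: drop every backslash-escape pair (a lone trailing backslash stays)
def stripEsc : List Char → List Char
  | [] => []
  | c :: [] => [c]
  | c :: c2 :: rest => if c == '\\' then stripEsc rest else c :: stripEsc (c2 :: rest)

-- phase 2 of Source B: count braces over the cleaned text, early true on depth < 0
def countLoop : List Char → Int → Bool
  | [], d => decide (d ≠ 0)
  | c :: rest, d =>
      if c == '{' then countLoop rest (d + 1)
      else if c == '}' then (if d - 1 < 0 then true else countLoop rest (d - 1))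
      else countLoop rest d

def has_unmatched_braces_py_alt (tex : String) : Bool := countLoop (stripEsc tex.toList) 0

-- ===== PRECONDITION & SPEC =====
def Spec_has_unmatched_braces_py (tex : String) (out : Bool) : Prop := out = has_unmatched_braces_py_alt tex
instance (tex : String) (out : Bool) : Decidable (Spec_has_unmatched_braces_py tex out) := by unfold Spec_has_unmatched_braces_py; infer_instance

-- ===== CLAIM (what is proved, stated in full; the proofs are below) =====
def Claim_equal_has_unmatched_braces_py : Prop := ∀ (tex : String), Dom_has_unmatched_braces_py tex → Spec_has_unmatched_braces_py tex (has_unmatched_braces_py tex)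

-- ===== LEMMAS AND PROOFS =====
theorem aLoop_eq_count (l : List Char) (d : Int) : aLoop l d = countLoop (stripEsc l) d := by
  fun_induction aLoop l d <;> simp_all [stripEsc, countLoop]

-- ===== VERDICT (by name: the statement is the Claim_ definition above) =====
theorem has_unmatched_braces_py_spec : Claim_equal_has_unmatched_braces_py := by
  intro tex _
  unfold Spec_has_unmatched_braces_py has_unmatched_braces_py has_unmatched_braces_py_alt
  exact aLoop_eq_count tex.toList 0
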